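-- pv_equiv track=rewrite | github.com/jmpark6846/konlp | text-mining/ready.py | make_clean
-- ===== SOURCE A (Python) =====
-- def make_clean(content):
--
-- 	puc_word={"?","!","\""}
-- 	space_word={"\'","\"", "--",",",".", "(", ")"}
--
-- 	for p in puc_word:
-- 		content = content.replace(p,"")
--
-- 	for s in space_word:
-- 		content = content.replace(s," ")
--
-- 	return content
-- ===== SOURCE B (Python) =====
-- def make_clean(content):
--     # stage 1: drop the characters the original deletes outright
--     kept = [c for c in content if c not in '?!"']
--     # stage 2: one explicit left-to-right scan with one-char lookahead:
--     # collapse '--' to a space, map the space-class characters, keep the rest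
--     out = []
--     i = 0
--     n = len(kept)
--     while i < n:
--         c = kept[i]
--         if c == '-' and i + 1 < n and kept[i + 1] == '-':
--             out.append(' ')
--             i += 2
--         elif c in "',.()":
--             out.append(' ')
--             i += 1
--         else:
--             out.append(c)
--             i += 1
--     return ''.join(out)
-- ===== Notes on version B (the rewrite author's own statement) =====
-- stated objective: alternative
-- what changed: A's nine sequential whole-string replace passes become a two-stage algorithm: a filter deleting the question-mark/exclamation/double-quote characters, then one explicit left-to-right scan with a one-character lookahead that collapses a double hyphen to a space and maps the space-class characters, building the output in a single accumulator instead of rescanning the string.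
import Mathlib
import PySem

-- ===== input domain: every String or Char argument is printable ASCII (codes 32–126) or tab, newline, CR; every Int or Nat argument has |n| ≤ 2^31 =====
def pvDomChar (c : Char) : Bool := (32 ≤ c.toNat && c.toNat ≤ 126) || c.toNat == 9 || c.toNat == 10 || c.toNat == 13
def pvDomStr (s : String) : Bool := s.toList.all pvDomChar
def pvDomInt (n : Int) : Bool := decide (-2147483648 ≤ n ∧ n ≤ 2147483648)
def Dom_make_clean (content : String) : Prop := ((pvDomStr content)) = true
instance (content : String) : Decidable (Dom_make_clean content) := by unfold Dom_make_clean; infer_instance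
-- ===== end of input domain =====

-- B replaces A's nine whole-string replace passes by a delete-filter plus one explicit
-- left-to-right scanner with one-character lookahead that collapses double hyphens (objective: alternative).

-- ===== PORT A =====
-- literal chain of A's replaces; CPython's set iteration order is not fixed, but A's result is
-- order-independent (no replacement creates a new occurrence of another pattern), so a fixed order is faithful.
def make_clean (content : String) : String :=
  let c := PySem.Str.replace content "?" ""
  let c := PySem.Str.replace c "!" ""
  let c := PySem.Str.replace c "\"" ""
  let c := PySem.Str.replace c "'" " "
  let c := PySem.Str.replace c "\"" " "
  let c := PySem.Str.replace c "--" " "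
  let c := PySem.Str.replace c "," " "
  let c := PySem.Str.replace c "." " "
  let c := PySem.Str.replace c "(" " "
  let c := PySem.Str.replace c ")" " "
  c

-- ===== PORT B =====
-- 'c not in '?!"'' of Source B's list comprehension
def pucB (c : Char) : Bool := c == '?' || c == '!' || c == '"'
-- 'c in "',.()"' of Source B's scanner
def spcB (c : Char) : Bool := c == '\'' || c == ',' || c == '.' || c == '(' || c == ')'

-- Source B's while loop: one left-to-right scan with one-character lookahead
def scanB : List Char → List Char
  | [] => []
  | [x] => if spcB x then [' '] else [x]
  | x :: y :: t =>
      if x = '-' ∧ y = '-' then ' ' :: scanB t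
      else (if spcB x then ' ' else x) :: scanB (y :: t)

def make_clean_alt (content : String) : String :=
  String.ofList (scanB (content.toList.filter (fun c => !(pucB c))))

-- ===== PRECONDITION & SPEC =====
def Spec_make_clean (content : String) (out : String) : Prop := out = make_clean_alt content
instance (content : String) (out : String) : Decidable (Spec_make_clean content out) := by unfold Spec_make_clean; infer_instance

-- ===== CLAIM (what is proved, stated in full; the proofs are below) =====
def Claim_equal_make_clean : Prop := ∀ (content : String), Dom_make_clean content → Spec_make_clean content (make_clean content)

-- ===== LEMMAS AND PROOFS =====

-- substituting a single character c by the string r, as the single-char replace computes it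
def subst (c : Char) (r : List Char) (l : List Char) : List Char :=
  l.flatMap (fun x => if x = c then r else [x])

-- the '--' → ' ' replace, written structurally
def dd : List Char → List Char
  | [] => []
  | [x] => [x]
  | x :: y :: t => if x = '-' ∧ y = '-' then ' ' :: dd t else x :: dd (y :: t)

lemma go_nil (old new : List Char) (fuel : Nat) (acc : List Char) :
    PySem.Chars.replace.go old new fuel [] acc = acc.reverse := by
  cases fuel <;> simp [PySem.Chars.replace.go]

lemma go_single (c : Char) (r : List Char) :
    ∀ (fuel : Nat) (l acc : List Char), l.length ≤ fuel →
      PySem.Chars.replace.go [c] r fuel l acc = acc.reverse ++ subst c r l := by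
  intro fuel
  induction fuel with
  | zero =>
    intro l acc h
    have : l = [] := List.eq_nil_of_length_eq_zero (Nat.le_zero.mp h)
    subst this
    simp [go_nil, subst]
  | succ n ih =>
    intro l acc h
    cases l with
    | nil => simp [go_nil, subst]
    | cons x t =>
      simp only [PySem.Chars.replace.go]
      by_cases hx : x = c
      · subst hx
        have hpre : List.isPrefixOf [x] (x :: t) = true := by
          simp [List.isPrefixOf]
        rw [if_pos hpre]
        simp only [List.length_cons, List.drop_succ_cons, List.length_nil, List.drop_zero]
        rw [ih t _ (by simpa using Nat.le_of_succ_le_succ h)]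
        simp [subst]
      · have hpre : List.isPrefixOf [c] (x :: t) = false := by
          simp [List.isPrefixOf]
          intro hc; exact absurd hc.symm hx
        rw [if_neg (by simp [hpre])]
        rw [ih t _ (by simpa using Nat.le_of_succ_le_succ h)]
        simp [subst, hx]

lemma replace_single (c : Char) (r : List Char) (l : List Char) :
    PySem.Chars.replace l [c] r = subst c r l := by
  simp [PySem.Chars.replace]
  simpa using go_single c r l.length l [] le_rfl

lemma go_dd :
    ∀ (fuel : Nat) (l acc : List Char), l.length ≤ fuel →
      PySem.Chars.replace.go ['-', '-'] [' '] fuel l acc = acc.reverse ++ dd l := by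
  intro fuel
  induction fuel with
  | zero =>
    intro l acc h
    have : l = [] := List.eq_nil_of_length_eq_zero (Nat.le_zero.mp h)
    subst this
    simp [go_nil, dd]
  | succ n ih =>
    intro l acc h
    cases l with
    | nil => simp [go_nil, dd]
    | cons x t =>
      cases t with
      | nil =>
        simp only [PySem.Chars.replace.go]
        have hpre : List.isPrefixOf ['-', '-'] [x] = false := by
          simp [List.isPrefixOf]
        rw [if_neg (by simp [hpre])]
        rw [go_nil]
        simp [dd]
      | cons y t' =>
        simp only [PySem.Chars.replace.go]
        by_cases hxy : x = '-' ∧ y = '-'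
        · obtain ⟨hx, hy⟩ := hxy
          subst hx; subst hy
          have hpre : List.isPrefixOf ['-', '-'] ('-' :: '-' :: t') = true := by
            simp [List.isPrefixOf]
          rw [if_pos hpre]
          simp only [List.length_cons, List.drop_succ_cons, List.length_nil, List.drop_zero]
          rw [ih t' _ (by simp at h ⊢; omega)]
          simp [dd]
        · have hpre : List.isPrefixOf ['-', '-'] (x :: y :: t') = false := by
            simp [List.isPrefixOf]
            intro hx hy
            exact hxy ⟨hx.symm, hy.symm⟩
          rw [if_neg (by simp [hpre])]
          rw [ih (y :: t') _ (by simp at h ⊢; omega)]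
          simp [dd, hxy]

lemma replace_dd (l : List Char) :
    PySem.Chars.replace l ['-', '-'] [' '] = dd l := by
  simp [PySem.Chars.replace]
  simpa using go_dd l.length l [] le_rfl

-- the first translation stage of A: remove '?','!','"', map '\'' to ' '
def tr1 (ch : Char) : Option Char :=
  if ch = '?' ∨ ch = '!' ∨ ch = '"' then none
  else if ch = '\'' then some ' '
  else some ch

-- the last translation stage of A: map ',','.','(',')' to ' '
def f4 (ch : Char) : Char :=
  if ch = ',' ∨ ch = '.' ∨ ch = '(' ∨ ch = ')' then ' ' else ch

-- the '\'' → ' ' part of stage one, spelled as a map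
def g1 (ch : Char) : Char := if ch = '\'' then ' ' else ch

lemma stage1 (cs : List Char) :
    subst '"' [' '] (subst '\'' [' '] (subst '"' [] (subst '!' [] (subst '?' [] cs)))) =
      cs.filterMap tr1 := by
  induction cs with
  | nil => simp [subst]
  | cons x t ih =>
    simp only [subst, List.flatMap_cons, List.flatMap_append] at *
    rw [ih]
    rcases eq_or_ne x '?' with h | h1
    · subst h; simp [tr1]
    rcases eq_or_ne x '!' with h | h2
    · subst h; simp [tr1]
    rcases eq_or_ne x '"' with h | h3
    · subst h; simp [tr1]
    rcases eq_or_ne x '\'' with h | h4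
    · subst h; simp [tr1, h1, h2, h3]
    simp [tr1, h1, h2, h3, h4]

lemma stage2 (l : List Char) :
    subst ')' [' '] (subst '(' [' '] (subst '.' [' '] (subst ',' [' '] l))) = l.map f4 := by
  induction l with
  | nil => simp [subst]
  | cons x t ih =>
    simp only [subst, List.flatMap_cons, List.flatMap_append] at *
    rw [ih]
    rcases eq_or_ne x ',' with h | h1
    · subst h; simp [f4]
    rcases eq_or_ne x '.' with h | h2
    · subst h; simp [f4, h1]
    rcases eq_or_ne x '(' with h | h3
    · subst h; simp [f4, h1, h2]
    rcases eq_or_ne x ')' with h | h4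
    · subst h; simp [f4, h1, h2, h3]
    simp [f4, h1, h2, h3, h4]

lemma dd_cons2 (x y : Char) (t : List Char) :
    dd (x :: y :: t) = if x = '-' ∧ y = '-' then ' ' :: dd t else x :: dd (y :: t) := by
  simp [dd]

-- dd commutes with any character map that preserves being '-'
lemma dd_map (f : Char → Char) (hf : f '-' = '-') (hf2 : ∀ x, f x = '-' → x = '-')
    (hsp : f ' ' = ' ') (l : List Char) : dd (l.map f) = (dd l).map f := by
  induction l using dd.induct with
  | case1 => simp [dd]
  | case2 x => simp [dd]
  | case3 x y t h ih =>
    obtain ⟨hx, hy⟩ := h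
    subst hx; subst hy
    simp only [List.map_cons, hf]
    rw [dd_cons2, dd_cons2, if_pos ⟨rfl, rfl⟩, if_pos ⟨rfl, rfl⟩, ih]
    simp [hsp]
  | case4 x y t h ih =>
    have h' : ¬ (f x = '-' ∧ f y = '-') := fun hp => h ⟨hf2 _ hp.1, hf2 _ hp.2⟩
    simp only [List.map_cons]
    rw [dd_cons2, dd_cons2, if_neg h', if_neg h]
    rw [← List.map_cons, ih]
    simp

-- A's stage one is the delete-filter followed by the '\''-map
lemma filterMap_tr1 (cs : List Char) :
    cs.filterMap tr1 = (cs.filter (fun c => !(pucB c))).map g1 := by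
  induction cs with
  | nil => simp
  | cons x t ih =>
    rw [List.filterMap_cons, List.filter_cons, ih]
    rcases eq_or_ne x '?' with h | h1
    · subst h; simp [tr1, pucB]
    rcases eq_or_ne x '!' with h | h2
    · subst h; simp [tr1, pucB]
    rcases eq_or_ne x '"' with h | h3
    · subst h; simp [tr1, pucB]
    rcases eq_or_ne x '\'' with h | h4
    · subst h; simp [tr1, pucB, g1]
    simp [tr1, pucB, g1, h1, h2, h3, h4]

lemma f4g1_spc (x : Char) (hs : spcB x = true) : f4 (g1 x) = ' ' := by
  simp only [spcB, Bool.or_eq_true, beq_iff_eq] at hs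
  rcases hs with ((((h | h) | h) | h) | h) <;> subst h <;> decide

lemma f4g1_nspc (x : Char) (hs : ¬ spcB x = true) : f4 (g1 x) = x := by
  simp only [spcB, Bool.or_eq_true, beq_iff_eq, not_or] at hs
  obtain ⟨⟨⟨⟨h1, h2⟩, h3⟩, h4⟩, h5⟩ := hs
  simp [f4, g1, h1, h2, h3, h4, h5]

-- B's scanner is dd followed by the full space-class map
lemma scanB_eq (l : List Char) : scanB l = (dd l).map (fun c => f4 (g1 c)) := by
  induction l using dd.induct with
  | case1 => simp [scanB, dd]
  | case2 x =>
    simp only [scanB, dd, List.map_cons, List.map_nil]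
    by_cases hs : spcB x = true
    · rw [if_pos hs, f4g1_spc x hs]
    · rw [if_neg hs, f4g1_nspc x hs]
  | case3 x y t h ih =>
    obtain ⟨hx, hy⟩ := h
    subst hx; subst hy
    simp only [scanB, dd]
    rw [ih]
    simp [f4, g1]
  | case4 x y t h ih =>
    rw [scanB, dd_cons2, if_neg h, if_neg h, List.map_cons, ih]
    by_cases hs : spcB x = true
    · rw [if_pos hs, f4g1_spc x hs]
    · rw [if_neg hs, f4g1_nspc x hs]

set_option maxHeartbeats 1000000 in
-- ===== VERDICT (by name: the statement is the Claim_ definition above) =====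
theorem make_clean_spec : Claim_equal_make_clean := by
  unfold Claim_equal_make_clean
  intro content _
  unfold Spec_make_clean make_clean make_clean_alt
  simp only [PySem.Str.replace, String.toList_ofList]
  refine congrArg String.ofList ?_
  have h1 : ("?" : String).toList = ['?'] := rfl
  have h2 : ("!" : String).toList = ['!'] := rfl
  have h3 : ("\"" : String).toList = ['"'] := rfl
  have h4 : ("'" : String).toList = ['\''] := rfl
  have h5 : (" " : String).toList = [' '] := rfl
  have h6 : ("--" : String).toList = ['-', '-'] := rfl
  have h7 : ("," : String).toList = [','] := rfl
  have h8 : ("." : String).toList = ['.'] := rfl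
  have h9 : ("(" : String).toList = ['('] := rfl
  have h10 : (")" : String).toList = [')'] := rfl
  have h11 : ("" : String).toList = [] := rfl
  rw [h1, h2, h3, h4, h5, h6, h7, h8, h9, h10, h11]
  rw [replace_dd]
  rw [replace_single, replace_single, replace_single, replace_single, replace_single,
      replace_single, replace_single, replace_single, replace_single]
  rw [stage1, stage2, filterMap_tr1, scanB_eq]
  rw [dd_map g1 (by decide) (by intro x; unfold g1; split_ifs <;> simp_all) (by decide)]
  simp [List.map_map, Function.comp]
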